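-- pv_equiv track=rewrite | github.com/henrfj/AoC-2023 | day12/task1.py | viable_solution
-- ===== SOURCE A (Python) =====
-- def viable_solution(symbols, groups):
--
--     groups_ = []
--     group_count = 0
--     in_group = False
--     for c in symbols:
--         if c =="#":
--             in_group = True
--             group_count += 1
--
--         elif c == "." and in_group:
--             in_group = False
--             groups_.append(group_count)
--             group_count = 0
--     if in_group:
--         groups_.append(group_count)
--
--     return groups_ == groups
-- ===== SOURCE B (Python) =====
-- def viable_solution(symbols, groups):
--     segments = []
--     cur = []
--     for c in symbols:
--         if c == ".":
--             segments.append(cur)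
--             cur = []
--         else:
--             cur.append(c)
--     segments.append(cur)
--     return [seg.count("#") for seg in segments if "#" in seg] == groups
-- ===== Notes on version B (the rewrite author's own statement) =====
-- stated objective: simpler
-- what changed: Replaces A's in_group/group_count state machine with a split-on-'.'-then-count decomposition: build the dot-separated segments, then compare [seg.count('#') for segments containing a '#'] with groups.
import Mathlib
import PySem

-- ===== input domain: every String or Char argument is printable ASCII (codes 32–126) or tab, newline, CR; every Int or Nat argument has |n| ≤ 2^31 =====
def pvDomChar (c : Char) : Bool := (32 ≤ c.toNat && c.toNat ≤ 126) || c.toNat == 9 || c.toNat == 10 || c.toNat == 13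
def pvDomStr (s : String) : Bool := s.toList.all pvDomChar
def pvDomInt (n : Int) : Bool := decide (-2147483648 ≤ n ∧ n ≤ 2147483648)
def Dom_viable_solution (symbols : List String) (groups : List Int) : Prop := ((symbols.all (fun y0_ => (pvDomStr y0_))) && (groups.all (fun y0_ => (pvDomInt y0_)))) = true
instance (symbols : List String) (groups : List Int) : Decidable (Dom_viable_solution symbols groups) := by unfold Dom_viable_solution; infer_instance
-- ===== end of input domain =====

-- ===== PORT A =====
-- B replaces A's in_group/group_count state machine with split-on-"." segments,
-- then counting "#" per segment (objective: simpler decomposition).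
def viableGo : List String → List Int → Int → Bool → List Int
  | [], groups_, group_count, in_group =>
      if in_group then groups_ ++ [group_count] else groups_
  | c :: rest, groups_, group_count, in_group =>
      if c = "#" then viableGo rest groups_ (group_count + 1) true
      else if c = "." ∧ in_group = true then viableGo rest (groups_ ++ [group_count]) 0 false
      else viableGo rest groups_ group_count in_group

def viable_solution (symbols : List String) (groups : List Int) : Bool :=
  viableGo symbols [] 0 false == groups

-- ===== PORT B =====
def viable_solution_alt (symbols : List String) (groups : List Int) : Bool :=
  let p := symbols.foldl
    (fun (p : List (List String) × List String) c =>
      if c = "." then (p.1 ++ [p.2], []) else (p.1, p.2 ++ [c]))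
    ([], [])
  let segments := p.1 ++ [p.2]
  ((segments.filter (fun seg => seg.contains "#")).map
      (fun seg => (PySem.List.count seg "#" : Int))) == groups

-- ===== PRECONDITION & SPEC =====
def Spec_viable_solution (symbols : List String) (groups : List Int) (out : Bool) : Prop := out = viable_solution_alt symbols groups
instance (symbols : List String) (groups : List Int) (out : Bool) : Decidable (Spec_viable_solution symbols groups out) := by unfold Spec_viable_solution; infer_instance

-- ===== CLAIM (what is proved, stated in full; the proofs are below) =====
def Claim_equal_viable_solution : Prop := ∀ (symbols : List String) (groups : List Int), Dom_viable_solution symbols groups → Spec_viable_solution symbols groups (viable_solution symbols groups)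

-- ===== LEMMAS AND PROOFS =====

def segOut (seg : List String) : List Int :=
  if "#" ∈ seg then [(PySem.List.count seg "#" : Int)] else []

def specGo : List String → List String → List Int
  | [], cur => segOut cur
  | x :: xs, cur => if x = "." then segOut cur ++ specGo xs [] else specGo xs (cur ++ [x])

theorem filter_map_eq_flatMap (l : List (List String)) :
    (l.filter (fun seg => seg.contains "#")).map (fun seg => (PySem.List.count seg "#" : Int))
      = l.flatMap segOut := by
  induction l with
  | nil => rfl
  | cons s t ih =>
      by_cases h : "#" ∈ s <;>
        simp [segOut, h, PySem.List.count_eq] at ih ⊢ <;> simp [ih]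

theorem bfold_eq_specGo (xs : List String) (segs : List (List String)) (cur : List String) :
    (((xs.foldl
        (fun (p : List (List String) × List String) c =>
          if c = "." then (p.1 ++ [p.2], []) else (p.1, p.2 ++ [c]))
        (segs, cur)).1
      ++ [(xs.foldl
        (fun (p : List (List String) × List String) c =>
          if c = "." then (p.1 ++ [p.2], []) else (p.1, p.2 ++ [c]))
        (segs, cur)).2]).flatMap segOut)
      = segs.flatMap segOut ++ specGo xs cur := by
  induction xs generalizing segs cur with
  | nil => simp [specGo]
  | cons x t ih =>
      by_cases h : x = "." <;> simp [List.foldl_cons, h, specGo, ih]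

theorem ago_eq_specGo (xs : List String) (gs : List Int) (cur : List String) :
    viableGo xs gs ((PySem.List.count cur "#" : Int)) (decide ("#" ∈ cur)) = gs ++ specGo xs cur := by
  induction xs generalizing gs cur with
  | nil =>
      by_cases h : "#" ∈ cur <;> simp [viableGo, specGo, segOut, h]
  | cons x t ih =>
      by_cases hx : x = "#"
      · subst hx
        have h1 : PySem.List.count (cur ++ ["#"]) "#" = PySem.List.count cur "#" + 1 := by
          simp [PySem.List.count_eq]
        have h2 : decide ("#" ∈ cur ++ ["#"]) = true := by simp
        have h3 := ih gs (cur ++ ["#"])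
        rw [h1, h2] at h3
        simp only [viableGo, specGo] at *
        simpa [Nat.cast_add] using h3
      · have hx' : ¬("#" = x) := fun h => hx h.symm
        by_cases hd : x = "."
        · subst hd
          by_cases hc : "#" ∈ cur
          · have h3 := ih (gs ++ [(PySem.List.count cur "#" : Int)]) []
            simp only [PySem.List.count_eq, List.count_nil, Nat.cast_zero,
              List.not_mem_nil, decide_false] at h3
            simp [viableGo, specGo, segOut, hx, hc, h3, List.append_assoc,
              PySem.List.count_eq]
          · have hc0 : List.count "#" cur = 0 := List.count_eq_zero.mpr hc
            have h3 := ih gs []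
            simp only [PySem.List.count_eq, List.count_nil, Nat.cast_zero,
              List.not_mem_nil, decide_false] at h3
            simp [viableGo, specGo, segOut, hx, hc, hc0, h3]
        · have h1 : PySem.List.count (cur ++ [x]) "#" = PySem.List.count cur "#" := by
            simp [PySem.List.count_eq, List.count_append, List.count_eq_zero, hx']
          have h2 : decide ("#" ∈ cur ++ [x]) = decide ("#" ∈ cur) := by
            simp [List.mem_append, hx']
          have h3 := ih gs (cur ++ [x])
          rw [h1, h2] at h3
          simp only [PySem.List.count_eq] at h3
          simp [viableGo, specGo, hx, hd, h3]

-- ===== VERDICT (by name: the statement is the Claim_ definition above) =====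
theorem viable_solution_spec : Claim_equal_viable_solution := by
  intro symbols groups _
  unfold Spec_viable_solution viable_solution viable_solution_alt
  have ha := ago_eq_specGo symbols [] []
  simp only [PySem.List.count_eq, List.count_nil, Nat.cast_zero,
    List.not_mem_nil, decide_false, List.nil_append] at ha
  simp only [filter_map_eq_flatMap, bfold_eq_specGo, ha, List.flatMap_nil, List.nil_append]
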